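-- pv_equiv track=rewrite | github.com/deadl0ck/SigenSmartControl | weather/forecast.py | _merge_primary_status_with_secondary_values
-- ===== SOURCE A (Python) =====
-- from typing import Any, Protocol, TypeAlias
--
-- PeriodForecast: TypeAlias = dict[str, tuple[int, str]]
--
-- def _merge_primary_status_with_secondary_values(
--
--     primary: PeriodForecast,
--     secondary: PeriodForecast,
--     tertiary: PeriodForecast | None,
-- ) -> PeriodForecast:
--     """Keep primary statuses while borrowing secondary watts when available.
--
--     This preserves ESB as the decision/status source while letting the
--     scheduler use site-level numeric forecasts for headroom and clipping
--     calculations. If the secondary provider is missing a period, fall back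
--     to the primary tuple unchanged.
--     """
--     merged: PeriodForecast = {}
--     for period, (primary_value, primary_status) in primary.items():
--         secondary_value = secondary.get(period)
--         if secondary_value is not None:
--             merged[period] = (secondary_value[0], primary_status)
--             continue
--
--         tertiary_value = tertiary.get(period) if tertiary is not None else None
--         if tertiary_value is not None:
--             merged[period] = (tertiary_value[0], primary_status)
--             continue
--
--         merged[period] = (primary_value, primary_status)
--
--     return merged
-- ===== SOURCE B (Python) =====
-- def _merge_primary_status_with_secondary_values(primary, secondary, tertiary):
--     # Different decomposition: seed with primary, then overwrite values (never
--     # statuses) by scanning tertiary and then secondary, so secondary wins.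
--     merged = dict(primary)
--     if tertiary is not None:
--         for period, (value, _status) in tertiary.items():
--             if period in merged:
--                 merged[period] = (value, merged[period][1])
--     for period, (value, _status) in secondary.items():
--         if period in merged:
--             merged[period] = (value, merged[period][1])
--     return merged
-- ===== Notes on version B (the rewrite author's own statement) =====
-- stated objective: alternative
-- what changed: B seeds the result dict with primary unchanged and then makes two overwrite passes that scan tertiary and then secondary, patching the value (never the status) of matching entries in place, instead of A's single loop over primary with a per-key lookup chain into secondary then tertiary.
import Mathlib
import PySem

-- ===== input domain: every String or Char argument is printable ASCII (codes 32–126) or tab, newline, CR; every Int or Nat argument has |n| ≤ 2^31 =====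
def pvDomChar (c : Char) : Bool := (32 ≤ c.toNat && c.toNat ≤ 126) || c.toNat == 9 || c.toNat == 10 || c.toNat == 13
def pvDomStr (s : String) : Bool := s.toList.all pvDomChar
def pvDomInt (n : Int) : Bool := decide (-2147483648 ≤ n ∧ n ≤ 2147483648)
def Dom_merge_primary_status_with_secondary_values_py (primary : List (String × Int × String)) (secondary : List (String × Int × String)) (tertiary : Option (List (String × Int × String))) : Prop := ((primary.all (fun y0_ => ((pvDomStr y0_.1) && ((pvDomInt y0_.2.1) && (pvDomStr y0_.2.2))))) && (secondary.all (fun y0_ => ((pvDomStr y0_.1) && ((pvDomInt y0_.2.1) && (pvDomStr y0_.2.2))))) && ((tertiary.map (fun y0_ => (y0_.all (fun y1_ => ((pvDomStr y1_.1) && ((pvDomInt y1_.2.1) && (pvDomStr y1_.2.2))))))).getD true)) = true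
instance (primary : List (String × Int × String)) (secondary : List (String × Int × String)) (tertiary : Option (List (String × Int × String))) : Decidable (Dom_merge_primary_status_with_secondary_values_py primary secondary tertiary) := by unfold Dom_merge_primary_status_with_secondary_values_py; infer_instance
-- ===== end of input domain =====

-- B seeds the result with primary and then overwrites values (never statuses) by
-- scanning tertiary then secondary, instead of A's per-primary-key lookup chain
-- (objective: alternative decomposition, same cost).


-- ===== PORT A =====
-- literal port of A: one loop over primary.items(), per key a lookup chain
-- secondary.get → tertiary.get → primary tuple, inserting into a fresh dict
def merge_primary_status_with_secondary_values_py (primary : List (String × Int × String)) (secondary : List (String × Int × String)) (tertiary : Option (List (String × Int × String))) : List (String × Int × String) :=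
  (primary.foldl (fun merged pr =>
      match (PySem.Dict.mk secondary).get? pr.1 with
      | some sv => merged.insert pr.1 (sv.1, pr.2.2)
      | none =>
        match (match tertiary with
               | some t => (PySem.Dict.mk t).get? pr.1
               | none => none) with
        | some tv => merged.insert pr.1 (tv.1, pr.2.2)
        | none => merged.insert pr.1 (pr.2.1, pr.2.2))
    PySem.Dict.empty).items

-- ===== PORT B =====
-- one overwrite pass of Source B: for period,(value,_) in src.items(): if period in merged: merged[period] = (value, merged[period][1])
def pvOverlay (src : List (String × Int × String)) (d : PySem.Dict String (Int × String)) : PySem.Dict String (Int × String) :=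
  src.foldl (fun d pr =>
    if d.contains pr.1 then d.modify pr.1 (0, "") (fun mv => (pr.2.1, mv.2)) else d) d

def merge_primary_status_with_secondary_values_py_alt (primary : List (String × Int × String)) (secondary : List (String × Int × String)) (tertiary : Option (List (String × Int × String))) : List (String × Int × String) :=
  let seed := primary.foldl (fun d pr => d.insert pr.1 (pr.2.1, pr.2.2)) PySem.Dict.empty
  let afterT := match tertiary with
                | some t => pvOverlay t seed
                | none => seed
  (pvOverlay secondary afterT).items

-- ===== PRECONDITION & SPEC =====
-- Pre_ excludes association lists with duplicate keys: the Python arguments are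
-- dicts, which can never contain a duplicate key, so such lists represent no
-- input A is ever called on (first-vs-last-match behaviour on them is accidental).
def Pre_merge_primary_status_with_secondary_values_py (primary : List (String × Int × String)) (secondary : List (String × Int × String)) (tertiary : Option (List (String × Int × String))) : Prop :=
  (primary.map Prod.fst).Nodup ∧ (secondary.map Prod.fst).Nodup ∧ ((tertiary.getD []).map Prod.fst).Nodup
instance (primary : List (String × Int × String)) (secondary : List (String × Int × String)) (tertiary : Option (List (String × Int × String))) : Decidable (Pre_merge_primary_status_with_secondary_values_py primary secondary tertiary) := by unfold Pre_merge_primary_status_with_secondary_values_py; infer_instance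

def pvWitness_merge_primary_status_with_secondary_values_py : (List (String × Int × String)) × (List (String × Int × String)) × (Option (List (String × Int × String))) :=
  ([("am", 100, "ok"), ("pm", 200, "low")], [("pm", 350, "x")], some [("am", 40, "y")])

def Spec_merge_primary_status_with_secondary_values_py (primary : List (String × Int × String)) (secondary : List (String × Int × String)) (tertiary : Option (List (String × Int × String))) (out : List (String × Int × String)) : Prop := out = merge_primary_status_with_secondary_values_py_alt primary secondary tertiary
instance (primary : List (String × Int × String)) (secondary : List (String × Int × String)) (tertiary : Option (List (String × Int × String))) (out : List (String × Int × String)) : Decidable (Spec_merge_primary_status_with_secondary_values_py primary secondary tertiary out) := by unfold Spec_merge_primary_status_with_secondary_values_py; infer_instance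

-- ===== CLAIM (what is proved, stated in full; the proofs are below) =====
def Claim_equal_merge_primary_status_with_secondary_values_py : Prop := ∀ (primary : List (String × Int × String)) (secondary : List (String × Int × String)) (tertiary : Option (List (String × Int × String))), Dom_merge_primary_status_with_secondary_values_py primary secondary tertiary → Pre_merge_primary_status_with_secondary_values_py primary secondary tertiary → Spec_merge_primary_status_with_secondary_values_py primary secondary tertiary (merge_primary_status_with_secondary_values_py primary secondary tertiary)

-- ===== LEMMAS AND PROOFS =====

-- the per-key value A ends up storing
def pvFinalA (secondary : List (String × Int × String)) (tertiary : Option (List (String × Int × String))) (pr : String × Int × String) : Int × String :=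
  match (PySem.Dict.mk secondary).get? pr.1 with
  | some sv => (sv.1, pr.2.2)
  | none =>
    match (match tertiary with
           | some t => (PySem.Dict.mk t).get? pr.1
           | none => none) with
    | some tv => (tv.1, pr.2.2)
    | none => (pr.2.1, pr.2.2)

-- what one overwrite pass does to a single stored item
def pvPatch (src : List (String × Int × String)) (it : String × Int × String) : String × Int × String :=
  match (PySem.Dict.mk src).get? it.1 with
  | some sv => (it.1, (sv.1, it.2.2))
  | none => it

theorem pvPatch_fst (src : List (String × Int × String)) (it : String × Int × String) :
    (pvPatch src it).1 = it.1 := by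
  unfold pvPatch
  cases (PySem.Dict.mk src).get? it.1 <;> rfl

theorem pvItemsA (primary secondary : List (String × Int × String)) (tertiary : Option (List (String × Int × String)))
    (hp : (primary.map Prod.fst).Nodup) :
    merge_primary_status_with_secondary_values_py primary secondary tertiary
      = primary.map (fun pr => (pr.1, pvFinalA secondary tertiary pr)) := by
  unfold merge_primary_status_with_secondary_values_py
  have hfun : (fun (merged : PySem.Dict String (Int × String)) (pr : String × Int × String) =>
      match (PySem.Dict.mk secondary).get? pr.1 with
      | some sv => merged.insert pr.1 (sv.1, pr.2.2)
      | none =>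
        match (match tertiary with
               | some t => (PySem.Dict.mk t).get? pr.1
               | none => none) with
        | some tv => merged.insert pr.1 (tv.1, pr.2.2)
        | none => merged.insert pr.1 (pr.2.1, pr.2.2))
      = (fun merged pr => merged.insert pr.1 (pvFinalA secondary tertiary pr)) := by
    funext m pr
    unfold pvFinalA
    cases (PySem.Dict.mk secondary).get? pr.1
    · cases (match tertiary with | some t => (PySem.Dict.mk t).get? pr.1 | none => none) <;> rfl
    · rfl
  rw [hfun]
  rw [PySem.Dict.items_foldl_insert_fresh primary (fun pr => pr.1) (pvFinalA secondary tertiary)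
      PySem.Dict.empty (fun a _ => PySem.Dict.contains_empty _) hp]
  simp [PySem.Dict.empty]

theorem pvItemsSeed (primary : List (String × Int × String)) (hp : (primary.map Prod.fst).Nodup) :
    (primary.foldl (fun d pr => d.insert pr.1 (pr.2.1, pr.2.2)) PySem.Dict.empty).items
      = primary.map (fun pr => (pr.1, (pr.2.1, pr.2.2))) := by
  rw [PySem.Dict.items_foldl_insert_fresh primary (fun pr => pr.1) (fun pr => (pr.2.1, pr.2.2))
      PySem.Dict.empty (fun a _ => PySem.Dict.contains_empty _) hp]
  simp [PySem.Dict.empty]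

theorem pvOverlay_items (src : List (String × Int × String)) (d : PySem.Dict String (Int × String))
    (hsrc : (src.map Prod.fst).Nodup) (hd : d.keys.Nodup) :
    (pvOverlay src d).items = d.items.map (pvPatch src) := by
  induction src generalizing d with
  | nil =>
    unfold pvOverlay pvPatch
    simp [PySem.Dict.get?]
  | cons pr rest ih =>
    obtain ⟨pk, pv⟩ := pr
    have hsrc2 : (pk :: rest.map Prod.fst).Nodup := by simpa using hsrc
    have hsrc' : (rest.map Prod.fst).Nodup := hsrc2.of_cons
    have hnotin : pk ∉ rest.map Prod.fst := (List.nodup_cons.mp hsrc2).1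
    have hrestnone : (PySem.Dict.mk rest).get? pk = none := by
      rw [PySem.Dict.get?_eq_none_iff_not_mem_keys]
      simpa [PySem.Dict.keys] using hnotin
    unfold pvOverlay
    simp only [List.foldl_cons]
    by_cases hc : d.contains pk = true
    · rw [if_pos hc]
      have hmod : d.modify pk (0, "") (fun mv => (pv.1, mv.2))
          = d.insert pk (pv.1, (d.getD pk (0, "")).2) := rfl
      have hkeys : (d.modify pk (0, "") (fun mv => (pv.1, mv.2))).keys = d.keys := by
        rw [hmod, PySem.Dict.keys_insert_of_contains _ _ hc]
      rw [show (rest.foldl (fun d pr => if d.contains pr.1 then d.modify pr.1 (0, "") (fun mv => (pr.2.1, mv.2)) else d) (d.modify pk (0, "") (fun mv => (pv.1, mv.2)))) = pvOverlay rest (d.modify pk (0, "") (fun mv => (pv.1, mv.2))) from rfl,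
         ih (d.modify pk (0, "") (fun mv => (pv.1, mv.2))) hsrc' (by rw [hkeys]; exact hd)]
      rw [hmod, PySem.Dict.items_insert_of_contains _ _ hc, List.map_map]
      apply List.map_congr_left
      rintro ⟨k, v⟩ hit
      by_cases hk : k = pk
      · subst hk
        have hval : d.getD k (0, "") = v :=
          PySem.Dict.getD_of_mem_items d hit hd (0, "")
        simp [pvPatch, PySem.Dict.get?_mk_cons, hval, hrestnone]
      · have hne : (k == pk) = false := by simpa using hk
        have hne' : (pk == k) = false := by simpa using (Ne.symm hk)
        simp [pvPatch, PySem.Dict.get?_mk_cons, hne', hk]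
    · rw [if_neg hc]
      rw [show (rest.foldl (fun d pr => if d.contains pr.1 then d.modify pr.1 (0, "") (fun mv => (pr.2.1, mv.2)) else d) d) = pvOverlay rest d from rfl, ih d hsrc' hd]
      apply List.map_congr_left
      intro it hit
      have hk : it.1 ≠ pk := by
        intro h
        apply hc
        rw [PySem.Dict.contains_iff_mem_keys, ← h]
        exact PySem.Dict.mem_keys_of_mem_items d hit
      have hne' : (pk == it.1) = false := by simpa using (Ne.symm hk)
      simp [pvPatch, PySem.Dict.get?_mk_cons, hne']

-- ===== VERDICT (by name: the statement is the Claim_ definition above) =====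
theorem merge_primary_status_with_secondary_values_py_spec : Claim_equal_merge_primary_status_with_secondary_values_py := by
  intro primary secondary tertiary _ hpre
  obtain ⟨hp, hs, ht⟩ := hpre
  unfold Spec_merge_primary_status_with_secondary_values_py
  unfold merge_primary_status_with_secondary_values_py_alt
  have hseedK : (primary.foldl (fun d pr => d.insert pr.1 (pr.2.1, pr.2.2)) PySem.Dict.empty).keys.Nodup :=
    PySem.Dict.nodup_keys_foldl_insert_key primary (fun pr => pr.1) (fun _ pr => (pr.2.1, pr.2.2))
      PySem.Dict.empty PySem.Dict.nodup_keys_empty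
  rw [pvItemsA primary secondary tertiary hp]
  cases tertiary with
  | none =>
    simp only
    rw [pvOverlay_items secondary _ hs hseedK, pvItemsSeed primary hp, List.map_map]
    apply List.map_congr_left
    intro pr _
    simp only [Function.comp]
    unfold pvPatch pvFinalA
    cases (PySem.Dict.mk secondary).get? pr.1 <;> rfl
  | some t =>
    simp only
    have ht' : (t.map Prod.fst).Nodup := by simpa using ht
    have hTitems := pvOverlay_items t _ ht' hseedK
    have hTkeys : (pvOverlay t (primary.foldl (fun d pr => d.insert pr.1 (pr.2.1, pr.2.2)) PySem.Dict.empty)).keys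
        = (primary.foldl (fun d pr => d.insert pr.1 (pr.2.1, pr.2.2)) PySem.Dict.empty).keys := by
      simp only [PySem.Dict.keys, hTitems, List.map_map]
      apply List.map_congr_left
      intro it _
      exact pvPatch_fst t it
    rw [pvOverlay_items secondary _ hs (by rw [hTkeys]; exact hseedK), hTitems,
        pvItemsSeed primary hp, List.map_map, List.map_map]
    apply List.map_congr_left
    intro pr _
    simp only [Function.comp]
    unfold pvPatch pvFinalA
    cases hsg : (PySem.Dict.mk secondary).get? pr.1 <;>
      cases htg : (PySem.Dict.mk t).get? pr.1 <;>
      simp [htg, hsg]
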